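-- pv_equiv track=rewrite | github.com/cirosantilli/project-euler-solvers | solvers/354.py | _B_for_integer_L
-- ===== SOURCE A (Python) =====
-- from typing import Dict, List, Tuple
--
-- def _trial_factorize(n: int) -> Dict[int, int]:
--     """Trial division factorization. Fast enough for the problem statement asserts."""
--     factors: Dict[int, int] = {}
--     if n <= 1:
--         return factors
--     # factor out 2
--     c = 0
--     while n % 2 == 0:
--         n //= 2
--         c += 1
--     if c:
--         factors[2] = c
--     d = 3
--     while d * d <= n:
--         if n % d == 0:
--             c = 0
--             while n % d == 0:
--                 n //= d
--                 c += 1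
--             factors[d] = c
--         d += 2
--     if n > 1:
--         factors[n] = factors.get(n, 0) + 1
--     return factors
--
-- def _R_from_factors(factors: Dict[int, int]) -> int:
--     """Compute R(n) = sum_{d|n} chi(d) from prime factorization of n."""
--     r = 1
--     for p, e in factors.items():
--         if p == 3:
--             continue
--         if p % 3 == 1:
--             r *= e + 1
--         else:
--             # p % 3 == 2
--             if e & 1:
--                 return 0
--     return r
--
-- def _B_for_integer_L(L: int) -> int:
--     """
--     B(L) for integer L. For our assert we only need L divisible by 3.
--     If L not attainable on the lattice, returns 0.
--     """
--     if L <= 0: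
--         return 0
--     if L % 3 != 0:
--         return 0  # then L^2/3 not an integer
--     k = L // 3
--     # n = L^2 / 3 = 3 * k^2, factor k and square exponents
--     fk = _trial_factorize(k)
--     fn: Dict[int, int] = {}
--     for p, e in fk.items():
--         fn[p] = 2 * e
--     fn[3] = fn.get(3, 0) + 1
--     return 6 * _R_from_factors(fn)
-- ===== SOURCE B (Python) =====
-- def _B_for_integer_L(L: int) -> int:
--     """
--     B(L) for integer L, via one trial-division pass over k = L // 3.
--
--     Since n = 3*k^2 has every prime exponent even except that of 3 (which is
--     skipped by chi), no p % 3 == 2 prime can make R vanish, and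
--     B(L) = 6 * prod_{p | k, p % 3 == 1} (2*e_p + 1).
--     """
--     if L <= 0 or L % 3 != 0:
--         return 0
--     k = L // 3
--     n = k
--     r = 1
--     d = 2
--     while d * d <= n:
--         if n % d == 0:
--             e = 0
--             while n % d == 0:
--                 n //= d
--                 e += 1
--             if d % 3 == 1:
--                 r *= 2 * e + 1
--         d += 1
--     if n > 1 and n % 3 == 1:
--         r *= 3
--     return 6 * r
-- ===== Notes on version B (the rewrite author's own statement) =====
-- stated objective: simpler
-- what changed: Replaces the factor-dict pipeline (factorize k into a dict, double every exponent, bump the exponent of 3, then a second pass computing R with chi logic and early-zero returns) by a single trial-division loop that multiplies an accumulator by (2*e+1) for each prime p = 1 mod 3 dividing k, using the fact that doubled exponents make the p = 2 mod 3 vanishing case and the chi(3) entry inert, so B(L) = 6*prod_{p|k, p=1 mod 3}(2*e_p+1).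
import Mathlib
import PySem

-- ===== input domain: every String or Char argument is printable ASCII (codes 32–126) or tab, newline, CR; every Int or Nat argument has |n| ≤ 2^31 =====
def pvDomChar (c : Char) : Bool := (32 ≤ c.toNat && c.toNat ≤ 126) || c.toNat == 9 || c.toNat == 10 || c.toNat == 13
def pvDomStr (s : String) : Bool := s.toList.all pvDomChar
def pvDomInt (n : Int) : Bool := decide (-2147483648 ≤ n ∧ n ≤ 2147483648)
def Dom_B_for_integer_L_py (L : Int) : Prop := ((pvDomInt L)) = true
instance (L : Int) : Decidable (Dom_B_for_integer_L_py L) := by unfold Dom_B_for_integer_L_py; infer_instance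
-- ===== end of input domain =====

-- B replaces A's factor-dict pipeline (factorize, double exponents, bump 3, second R pass)
-- by one trial-division loop accumulating prod_{p|k, p%3=1}(2*e_p+1); objective: simpler.

-- ===== PORT A =====
-- termination facts for the loop ports, cited by name in decreasing_by
theorem pv_dec_two (n : Int) (h : 1 < n ∧ PySem.Int.mod n 2 = 0) :
    (PySem.Int.floordiv n 2).toNat < n.toNat := by
  rw [PySem.Int.floordiv_eq_ediv_of_pos (by norm_num)]
  omega

theorem pv_dec_div (d n : Int) (h : 1 < n ∧ PySem.Int.mod n d = 0 ∧ 2 ≤ d) :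
    (PySem.Int.floordiv n d).toNat < n.toNat := by
  have hlt : PySem.Int.floordiv n d < n := by
    rw [PySem.Int.floordiv_lt_iff_lt_mul (by omega)]
    nlinarith [h.1, h.2.2]
  omega

theorem pv_dec_outer (d n n' : Int) (s : Int) (h1 : d * d ≤ n) (h2 : 2 ≤ d) (h3 : n' ≤ n)
    (h4 : 1 ≤ s) : (n' + 2 - (d + s)).toNat < (n + 2 - d).toNat := by
  have hd : d ≤ n := le_trans (le_mul_of_one_le_left (by omega) (by omega)) h1
  omega

-- `while n % 2 == 0:` of _trial_factorize; the extra `1 < n` in the guard is exact on the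
-- reachable states (the loop is entered with n ≥ 2 and n stays ≥ 1, and 1 % 2 ≠ 0).
def pvA_div2 (n c : Int) : Int × Int :=
  if h : 1 < n ∧ PySem.Int.mod n 2 = 0 then pvA_div2 (PySem.Int.floordiv n 2) (c + 1)
  else (n, c)
termination_by n.toNat
decreasing_by exact pv_dec_two n h

-- inner `while n % d == 0:` of _trial_factorize; `1 < n ∧ 2 ≤ d` in the guard is exact on
-- the reachable states (d ≥ 3 and n ≥ 1 there, and 1 % d ≠ 0 for d ≥ 2).
def pvA_divloop (d n c : Int) : Int × Int :=
  if h : 1 < n ∧ PySem.Int.mod n d = 0 ∧ 2 ≤ d then pvA_divloop d (PySem.Int.floordiv n d) (c + 1)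
  else (n, c)
termination_by n.toNat
decreasing_by exact pv_dec_div d n h

-- the result of the inner loop never exceeds its input (for the termination of pvA_odd)
theorem pvA_divloop_le (d n c : Int) : (pvA_divloop d n c).1 ≤ n := by
  fun_induction pvA_divloop with
  | case1 n c h ih =>
    have : PySem.Int.floordiv n d ≤ n := by
      rw [PySem.Int.floordiv_eq_ediv_of_pos (by omega)]
      exact Int.ediv_le_self d (by omega)
    omega
  | case2 => simp

-- outer `while d * d <= n:` of _trial_factorize; `3 ≤ d` in the guard is exact on the
-- reachable states (d starts at 3 and only grows).
def pvA_odd (d n : Int) (acc : PySem.Dict Int Int) : Int × PySem.Dict Int Int :=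
  if h : d * d ≤ n ∧ 3 ≤ d then
    if PySem.Int.mod n d = 0 then
      let p := pvA_divloop d n 0
      pvA_odd (d + 2) p.1 (acc.insert d p.2)
    else pvA_odd (d + 2) n acc
  else (n, acc)
termination_by (n + 2 - d).toNat
decreasing_by
  · exact pv_dec_outer d n _ 2 h.1 (by omega) (pvA_divloop_le d n 0) (by omega)
  · exact pv_dec_outer d n n 2 h.1 (by omega) (le_refl n) (by omega)

def pvA_factorize (n : Int) : PySem.Dict Int Int :=
  if n ≤ 1 then PySem.Dict.empty
  else
    let p := pvA_div2 n 0
    let factors : PySem.Dict Int Int :=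
      if p.2 ≠ 0 then (PySem.Dict.empty).insert 2 p.2 else PySem.Dict.empty
    let q := pvA_odd 3 p.1 factors
    if 1 < q.1 then q.2.insert q.1 (q.2.getD q.1 0 + 1) else q.2

-- `for p, e in factors.items():` of _R_from_factors, with its early `return 0`
def pvA_R (items : List (Int × Int)) (r : Int) : Int :=
  match items with
  | [] => r
  | (p, e) :: rest =>
    if p = 3 then pvA_R rest r
    else if PySem.Int.mod p 3 = 1 then pvA_R rest (r * (e + 1))
    else if PySem.Int.band e 1 ≠ 0 then 0
    else pvA_R rest r

def B_for_integer_L_py (L : Int) : Int :=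
  if L ≤ 0 then 0
  else if PySem.Int.mod L 3 ≠ 0 then 0
  else
    let k := PySem.Int.floordiv L 3
    let fk := pvA_factorize k
    let fn := fk.items.foldl (fun d pe => d.insert pe.1 (2 * pe.2)) PySem.Dict.empty
    let fn2 := fn.insert 3 (fn.getD 3 0 + 1)
    6 * pvA_R fn2.items 1

-- ===== PORT B =====
-- inner `while n % d == 0:` of Source B; `1 < n ∧ 2 ≤ d` in the guard is exact on the
-- reachable states, as for pvA_divloop.
def pvB_div (d n e : Int) : Int × Int :=
  if h : 1 < n ∧ PySem.Int.mod n d = 0 ∧ 2 ≤ d then pvB_div d (PySem.Int.floordiv n d) (e + 1)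
  else (n, e)
termination_by n.toNat
decreasing_by exact pv_dec_div d n h

theorem pvB_div_le (d n e : Int) : (pvB_div d n e).1 ≤ n := by
  fun_induction pvB_div with
  | case1 n e h ih =>
    have : PySem.Int.floordiv n d ≤ n := by
      rw [PySem.Int.floordiv_eq_ediv_of_pos (by omega)]
      exact Int.ediv_le_self d (by omega)
    omega
  | case2 => simp

-- `while d * d <= n:` of Source B; `2 ≤ d` in the guard is exact on the reachable states
-- (d starts at 2 and only grows).
def pvB_loop (d n r : Int) : Int × Int :=
  if h : d * d ≤ n ∧ 2 ≤ d then
    if PySem.Int.mod n d = 0 then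
      let p := pvB_div d n 0
      pvB_loop (d + 1) p.1 (if PySem.Int.mod d 3 = 1 then r * (2 * p.2 + 1) else r)
    else pvB_loop (d + 1) n r
  else (n, r)
termination_by (n + 2 - d).toNat
decreasing_by
  · exact pv_dec_outer d n _ 1 h.1 h.2 (pvB_div_le d n 0) (by omega)
  · exact pv_dec_outer d n n 1 h.1 h.2 (le_refl n) (by omega)

def B_for_integer_L_py_alt (L : Int) : Int :=
  if L ≤ 0 ∨ PySem.Int.mod L 3 ≠ 0 then 0
  else
    let k := PySem.Int.floordiv L 3
    let p := pvB_loop 2 k 1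
    6 * (if 1 < p.1 ∧ PySem.Int.mod p.1 3 = 1 then p.2 * 3 else p.2)

-- ===== PRECONDITION & SPEC =====
def Spec_B_for_integer_L_py (L : Int) (out : Int) : Prop := out = B_for_integer_L_py_alt L
instance (L : Int) (out : Int) : Decidable (Spec_B_for_integer_L_py L out) := by unfold Spec_B_for_integer_L_py; infer_instance

-- ===== CLAIM (what is proved, stated in full; the proofs are below) =====
def Claim_equal_B_for_integer_L_py : Prop := ∀ (L : Int), Dom_B_for_integer_L_py L → Spec_B_for_integer_L_py L (B_for_integer_L_py L)

-- ===== LEMMAS AND PROOFS =====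

-- the accumulator step of B's loop, as a named function (proof-side only)
def pvProdStep (r : Int) (pe : Int × Int) : Int :=
  if PySem.Int.mod pe.1 3 = 1 then r * (2 * pe.2 + 1) else r

-- B's inner division loop is (syntactically) the same loop as A's
theorem pvB_div_eq_divloop (d n e : Int) : pvB_div d n e = pvA_divloop d n e := by
  fun_induction pvB_div with
  | case1 n e h ih => rw [pvA_divloop, dif_pos h]; exact ih
  | case2 n e h => rw [pvA_divloop, dif_neg h]

-- A's power-of-two loop is its d-division loop at d = 2
theorem pvA_divloop_two (n c : Int) : pvA_divloop 2 n c = pvA_div2 n c := by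
  fun_induction pvA_divloop with
  | case1 n c h ih => rw [pvA_div2, dif_pos ⟨h.1, h.2.1⟩]; exact ih
  | case2 n c h =>
    rw [pvA_div2, dif_neg (by intro hc; exact h ⟨hc.1, hc.2, by norm_num⟩)]

-- facts about the inner division loop: the result divides the input, stays positive,
-- and is no longer divisible by d
theorem pvA_divloop_facts (d n c : Int) (hd : 2 ≤ d) (hn : 1 ≤ n) :
    (pvA_divloop d n c).1 ∣ n ∧ 1 ≤ (pvA_divloop d n c).1 ∧ ¬ d ∣ (pvA_divloop d n c).1 := by
  fun_induction pvA_divloop with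
  | case1 n c h ih =>
    have hdvd : d ∣ n := by rw [← PySem.Int.mod_eq_zero_iff_dvd]; exact h.2.1
    have hdn : d ≤ n := Int.le_of_dvd (by omega) hdvd
    have h1 : 1 ≤ PySem.Int.floordiv n d := by
      rw [PySem.Int.le_floordiv_iff_mul_le (by omega)]; omega
    have hq : PySem.Int.floordiv n d ∣ n := by
      rw [PySem.Int.floordiv_eq_ediv_of_pos (by omega)]
      exact Int.ediv_dvd_of_dvd hdvd
    obtain ⟨i1, i2, i3⟩ := ih h1
    exact ⟨dvd_trans i1 hq, i2, i3⟩
  | case2 n c h =>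
    refine ⟨dvd_refl n, hn, ?_⟩
    intro hdvd
    have := Int.le_of_dvd (by omega) hdvd
    rcases not_and_or.mp h with h1 | h1
    · have : n = 1 := by omega
      subst this
      have := Int.le_of_dvd one_pos hdvd
      omega
    · rcases not_and_or.mp h1 with h2 | h2
      · exact h2 (by rw [PySem.Int.mod_eq_zero_iff_dvd]; exact hdvd)
      · omega

theorem pvA_div2_c_ge (n c : Int) : c ≤ (pvA_div2 n c).2 := by
  fun_induction pvA_div2 with
  | case1 n c h ih => omega
  | case2 n c h => simp

theorem pvA_div2_facts (n c : Int) (hn : 1 ≤ n) :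
    1 ≤ (pvA_div2 n c).1 ∧ ¬ (2:Int) ∣ (pvA_div2 n c).1 := by
  fun_induction pvA_div2 with
  | case1 n c h ih =>
    apply ih
    rw [PySem.Int.le_floordiv_iff_mul_le (by norm_num)]; omega
  | case2 n c h =>
    refine ⟨hn, ?_⟩
    rw [PySem.Int.mod_eq_emod_of_pos (by norm_num)] at h
    omega

-- invariant of A's outer trial-division loop: the final remainder is a positive divisor
-- of the input, keys stay unique, and every recorded key is ≥ 2 and no longer divides it
theorem pvA_odd_inv (d n : Int) (acc : PySem.Dict Int Int) (hd : 3 ≤ d) (hn : 1 ≤ n)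
    (hnd : acc.keys.Nodup) (hk : ∀ p ∈ acc.keys, 2 ≤ p ∧ ¬ p ∣ n) :
    1 ≤ (pvA_odd d n acc).1 ∧ (pvA_odd d n acc).1 ∣ n ∧ (pvA_odd d n acc).2.keys.Nodup ∧
      (∀ p ∈ (pvA_odd d n acc).2.keys, 2 ≤ p ∧ ¬ p ∣ (pvA_odd d n acc).1) := by
  fun_induction pvA_odd with
  | case1 d n acc h hmod p ih =>
    have hn9 : 9 ≤ n := le_trans (by nlinarith [h.2]) h.1
    obtain ⟨f1, f2, f3⟩ := pvA_divloop_facts d n 0 (by omega) (by omega)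
    have hk' : ∀ p ∈ (acc.insert d (pvA_divloop d n 0).2).keys,
        2 ≤ p ∧ ¬ p ∣ (pvA_divloop d n 0).1 := by
      intro p hp
      rcases (PySem.Dict.mem_keys_insert _ _ _ _).mp hp with hpd | hpa
      · subst hpd; exact ⟨by omega, f3⟩
      · obtain ⟨g1, g2⟩ := hk p hpa
        exact ⟨g1, fun hdvd => g2 (dvd_trans hdvd f1)⟩
    obtain ⟨i1, i2, i3, i4⟩ := ih (by omega) f2 (PySem.Dict.nodup_keys_insert _ _ _ hnd) hk'
    exact ⟨i1, dvd_trans i2 f1, i3, i4⟩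
  | case2 d n acc h hmod ih => exact ih (by omega) hn hnd hk
  | case3 d n acc h => exact ⟨hn, dvd_refl n, hnd, hk⟩

-- the accumulator of A's outer loop is append-only: running from acc is running from ∅
-- with acc's items in front
theorem pvA_odd_shift (m : Nat) : ∀ (d n : Int) (acc : PySem.Dict Int Int),
    (n + 2 - d).toNat ≤ m → 3 ≤ d → 1 ≤ n → (∀ p ∈ acc.keys, 2 ≤ p ∧ ¬ p ∣ n) →
    (pvA_odd d n acc).1 = (pvA_odd d n PySem.Dict.empty).1 ∧
    (pvA_odd d n acc).2.items = acc.items ++ (pvA_odd d n PySem.Dict.empty).2.items := by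
  induction m using Nat.strong_induction_on with
  | _ m ih =>
  intro d n acc hm hd hn hk
  by_cases hg : d * d ≤ n ∧ 3 ≤ d
  · have hdn : d ≤ n := le_trans (by nlinarith [hg.2]) hg.1
    by_cases hmod : PySem.Int.mod n d = 0
    · have hdvd : d ∣ n := by rw [← PySem.Int.mod_eq_zero_iff_dvd]; exact hmod
      obtain ⟨f1, f2, f3⟩ := pvA_divloop_facts d n 0 (by omega) (by omega)
      have hle : (pvA_divloop d n 0).1 ≤ n := pvA_divloop_le d n 0
      have eA : pvA_odd d n acc
          = pvA_odd (d + 2) (pvA_divloop d n 0).1 (acc.insert d (pvA_divloop d n 0).2) := by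
        rw [pvA_odd]; simp [hg, hmod]
      have eE : pvA_odd d n PySem.Dict.empty
          = pvA_odd (d + 2) (pvA_divloop d n 0).1 (PySem.Dict.empty.insert d (pvA_divloop d n 0).2) := by
        rw [pvA_odd]; simp [hg, hmod]
      have hkacc : ∀ p ∈ (acc.insert d (pvA_divloop d n 0).2).keys,
          2 ≤ p ∧ ¬ p ∣ (pvA_divloop d n 0).1 := by
        intro p hp
        rcases (PySem.Dict.mem_keys_insert _ _ _ _).mp hp with hpd | hpa
        · subst hpd; exact ⟨by omega, f3⟩
        · obtain ⟨g1, g2⟩ := hk p hpa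
          exact ⟨g1, fun hdvd' => g2 (dvd_trans hdvd' f1)⟩
      have hkone : ∀ p ∈ (PySem.Dict.empty.insert d (pvA_divloop d n 0).2).keys,
          2 ≤ p ∧ ¬ p ∣ (pvA_divloop d n 0).1 := by
        intro p hp
        rcases (PySem.Dict.mem_keys_insert _ _ _ _).mp hp with hpd | hpa
        · subst hpd; exact ⟨by omega, f3⟩
        · simp [PySem.Dict.keys_empty] at hpa
      obtain ⟨s1, s2⟩ := ih ((pvA_divloop d n 0).1 + 2 - (d + 2)).toNat (by omega)
        (d + 2) (pvA_divloop d n 0).1 (acc.insert d (pvA_divloop d n 0).2)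
        (le_refl _) (by omega) f2 hkacc
      obtain ⟨t1, t2⟩ := ih ((pvA_divloop d n 0).1 + 2 - (d + 2)).toNat (by omega)
        (d + 2) (pvA_divloop d n 0).1 (PySem.Dict.empty.insert d (pvA_divloop d n 0).2)
        (le_refl _) (by omega) f2 hkone
      have hcacc : acc.contains d = false := by
        rw [PySem.Dict.contains_eq_decide_mem_keys]
        simp only [decide_eq_false_iff_not]
        intro hmem
        exact (hk d hmem).2 hdvd
      have hiacc : (acc.insert d (pvA_divloop d n 0).2).items
          = acc.items ++ [(d, (pvA_divloop d n 0).2)] :=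
        PySem.Dict.items_insert_of_not_contains _ _ hcacc
      have hione : (PySem.Dict.empty.insert d (pvA_divloop d n 0).2).items
          = [(d, (pvA_divloop d n 0).2)] := by
        rw [PySem.Dict.items_insert_of_not_contains _ _ (PySem.Dict.contains_empty _)]
        simp [show (PySem.Dict.empty : PySem.Dict Int Int).items = [] from rfl]
      constructor
      · rw [eA, eE, s1, t1]
      · rw [eA, eE, s2, t2, hiacc, hione]
        simp
    · have eA : pvA_odd d n acc = pvA_odd (d + 2) n acc := by
        rw [pvA_odd]; simp [hg, hmod]
      have eE : pvA_odd d n PySem.Dict.empty = pvA_odd (d + 2) n PySem.Dict.empty := by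
        rw [pvA_odd]; simp [hg, hmod]
      obtain ⟨s1, s2⟩ := ih (n + 2 - (d + 2)).toNat (by omega) (d + 2) n acc
        (le_refl _) (by omega) hn hk
      rw [eA, eE]
      exact ⟨s1, s2⟩
  · have eA : pvA_odd d n acc = (n, acc) := by rw [pvA_odd]; simp [hg]
    have eE : pvA_odd d n PySem.Dict.empty = (n, PySem.Dict.empty) := by rw [pvA_odd]; simp [hg]
    rw [eA, eE]
    simp [show (PySem.Dict.empty : PySem.Dict Int Int).items = [] from rfl]

-- the LINK: on odd n, B's step-1 loop from an odd d computes exactly the remainder of A's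
-- step-2 loop together with the product of pvProdStep over the factors A records
theorem pv_link (m : Nat) : ∀ (d n r : Int),
    (n + 2 - d).toNat ≤ m → 1 ≤ n → ¬ (2:Int) ∣ n → 3 ≤ d → ¬ (2:Int) ∣ d →
    pvB_loop d n r = ((pvA_odd d n PySem.Dict.empty).1,
      (pvA_odd d n PySem.Dict.empty).2.items.foldl pvProdStep r) := by
  induction m using Nat.strong_induction_on with
  | _ m ih =>
  intro d n r hm hn hnodd hd hdodd
  by_cases hg : d * d ≤ n
  · have hdn : d ≤ n := le_trans (by nlinarith) hg
    have hd1odd : (2:Int) ∣ (d + 1) := by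
      rcases Int.even_or_odd d with he | ho
      · exact absurd he.two_dvd hdodd
      · obtain ⟨j, hj⟩ := ho; exact ⟨j + 1, by omega⟩
    by_cases hmod : PySem.Int.mod n d = 0
    · obtain ⟨f1, f2, f3⟩ := pvA_divloop_facts d n 0 (by omega) (by omega)
      have hle : (pvA_divloop d n 0).1 ≤ n := pvA_divloop_le d n 0
      have hnodd' : ¬ (2:Int) ∣ (pvA_divloop d n 0).1 :=
        fun h2 => hnodd (dvd_trans h2 f1)
      have hdvd : d ∣ n := by rw [← PySem.Int.mod_eq_zero_iff_dvd]; exact hmod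
      have eB1 : pvB_loop d n r = pvB_loop (d + 1) (pvA_divloop d n 0).1
          (if PySem.Int.mod d 3 = 1 then r * (2 * (pvA_divloop d n 0).2 + 1) else r) := by
        rw [pvB_loop]; simp [hg, hmod, (by omega : (2:Int) ≤ d), pvB_div_eq_divloop]
      have eA1 : pvA_odd d n PySem.Dict.empty
          = pvA_odd (d + 2) (pvA_divloop d n 0).1 (PySem.Dict.empty.insert d (pvA_divloop d n 0).2) := by
        rw [pvA_odd]; simp [hg, hmod, (by omega : (3:Int) ≤ d)]
      have hkone : ∀ p ∈ (PySem.Dict.empty.insert d (pvA_divloop d n 0).2).keys,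
          2 ≤ p ∧ ¬ p ∣ (pvA_divloop d n 0).1 := by
        intro p hp
        rcases (PySem.Dict.mem_keys_insert _ _ _ _).mp hp with hpd | hpa
        · subst hpd; exact ⟨by omega, f3⟩
        · simp [PySem.Dict.keys_empty] at hpa
      obtain ⟨t1, t2⟩ := pvA_odd_shift ((pvA_divloop d n 0).1 + 2 - (d + 2)).toNat
        (d + 2) (pvA_divloop d n 0).1 (PySem.Dict.empty.insert d (pvA_divloop d n 0).2)
        (le_refl _) (by omega) f2 hkone
      have hione : (PySem.Dict.empty.insert d (pvA_divloop d n 0).2).items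
          = [(d, (pvA_divloop d n 0).2)] := by
        rw [PySem.Dict.items_insert_of_not_contains _ _ (PySem.Dict.contains_empty _)]
        simp [show (PySem.Dict.empty : PySem.Dict Int Int).items = [] from rfl]
      by_cases hg2 : (d + 1) * (d + 1) ≤ (pvA_divloop d n 0).1
      · have hmod2 : ¬ PySem.Int.mod (pvA_divloop d n 0).1 (d + 1) = 0 := by
          rw [PySem.Int.mod_eq_zero_iff_dvd]
          intro hdd
          exact hnodd' (dvd_trans hd1odd hdd)
        have eB2 : pvB_loop (d + 1) (pvA_divloop d n 0).1
            (if PySem.Int.mod d 3 = 1 then r * (2 * (pvA_divloop d n 0).2 + 1) else r)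
            = pvB_loop (d + 2) (pvA_divloop d n 0).1
            (if PySem.Int.mod d 3 = 1 then r * (2 * (pvA_divloop d n 0).2 + 1) else r) := by
          rw [pvB_loop]
          simp only [dif_pos (⟨hg2, by omega⟩ : (d + 1) * (d + 1) ≤ (pvA_divloop d n 0).1 ∧ (2:Int) ≤ d + 1)]
          rw [if_neg hmod2]
          ring_nf
        obtain ihe := ih ((pvA_divloop d n 0).1 + 2 - (d + 2)).toNat (by omega)
          (d + 2) (pvA_divloop d n 0).1
          (if PySem.Int.mod d 3 = 1 then r * (2 * (pvA_divloop d n 0).2 + 1) else r)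
          (le_refl _) f2 hnodd' (by omega) (by intro h2; obtain ⟨j, hj⟩ := h2; obtain ⟨i, hi⟩ := hd1odd; omega)
        rw [eB1, eB2, ihe, eA1, t1, t2, hione]
        simp [pvProdStep]
      · have eB2 : pvB_loop (d + 1) (pvA_divloop d n 0).1
            (if PySem.Int.mod d 3 = 1 then r * (2 * (pvA_divloop d n 0).2 + 1) else r)
            = ((pvA_divloop d n 0).1,
               if PySem.Int.mod d 3 = 1 then r * (2 * (pvA_divloop d n 0).2 + 1) else r) := by
          rw [pvB_loop]
          rw [dif_neg (by intro hc; exact hg2 hc.1)]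
        have eA2 : pvA_odd (d + 2) (pvA_divloop d n 0).1 PySem.Dict.empty
            = ((pvA_divloop d n 0).1, PySem.Dict.empty) := by
          rw [pvA_odd]
          rw [dif_neg (by intro hc; exact hg2 (le_trans (by nlinarith) hc.1))]
        rw [eB1, eB2, eA1, t1, t2, eA2, hione]
        simp [pvProdStep, show (PySem.Dict.empty : PySem.Dict Int Int).items = [] from rfl]
    · have eB1 : pvB_loop d n r = pvB_loop (d + 1) n r := by
        rw [pvB_loop]; simp [hg, hmod, (by omega : (2:Int) ≤ d)]
      have eA1 : pvA_odd d n PySem.Dict.empty = pvA_odd (d + 2) n PySem.Dict.empty := by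
        rw [pvA_odd]; simp [hg, hmod, (by omega : (3:Int) ≤ d)]
      have hmod2 : ¬ PySem.Int.mod n (d + 1) = 0 := by
        rw [PySem.Int.mod_eq_zero_iff_dvd]
        intro hdd
        exact hnodd (dvd_trans hd1odd hdd)
      by_cases hg2 : (d + 1) * (d + 1) ≤ n
      · have eB2 : pvB_loop (d + 1) n r = pvB_loop (d + 2) n r := by
          rw [pvB_loop]
          simp only [dif_pos (⟨hg2, by omega⟩ : (d + 1) * (d + 1) ≤ n ∧ (2:Int) ≤ d + 1)]
          rw [if_neg hmod2]
          ring_nf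
        obtain ihe := ih (n + 2 - (d + 2)).toNat (by omega) (d + 2) n r
          (le_refl _) hn hnodd (by omega) (by intro h2; obtain ⟨j, hj⟩ := h2; obtain ⟨i, hi⟩ := hd1odd; omega)
        rw [eB1, eB2, ihe, eA1]
      · have eB2 : pvB_loop (d + 1) n r = (n, r) := by
          rw [pvB_loop]
          rw [dif_neg (by intro hc; exact hg2 hc.1)]
        have eA2 : pvA_odd (d + 2) n PySem.Dict.empty = (n, PySem.Dict.empty) := by
          rw [pvA_odd]
          rw [dif_neg (by intro hc; exact hg2 (le_trans (by nlinarith) hc.1))]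
        rw [eB1, eB2, eA1, eA2]
        simp [show (PySem.Dict.empty : PySem.Dict Int Int).items = [] from rfl]
  · have eB : pvB_loop d n r = (n, r) := by
      rw [pvB_loop]; rw [dif_neg (by intro hc; exact hg hc.1)]
    have eA : pvA_odd d n PySem.Dict.empty = (n, PySem.Dict.empty) := by
      rw [pvA_odd]; rw [dif_neg (by intro hc; exact hg hc.1)]
    rw [eB, eA]
    simp [show (PySem.Dict.empty : PySem.Dict Int Int).items = [] from rfl]

-- A's R pass over a dict whose values are doubled is B's product accumulation
theorem pvA_R_doubled (l : List (Int × Int)) : ∀ (r : Int),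
    pvA_R (l.map (fun pe => (pe.1, 2 * pe.2))) r = l.foldl pvProdStep r := by
  induction l with
  | nil => intro r; simp [pvA_R]
  | cons pe rest ih =>
    intro r
    obtain ⟨p, e⟩ := pe
    by_cases h3 : p = 3
    · subst h3
      have hm : PySem.Int.mod (3:Int) 3 ≠ 1 := by decide
      simp [pvA_R, pvProdStep, ih]
    · by_cases h1 : p % 3 = 1
      · simp [pvA_R, pvProdStep, h3, h1, ih]
      · have heven : ¬ PySem.Int.band (2 * e) 1 ≠ 0 := by
          rw [ne_eq, not_not, PySem.Int.band_one, PySem.Int.mod_eq_zero_iff_dvd]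
          exact ⟨e, rfl⟩
        simp [pvA_R, pvProdStep, h3, h1, heven, ih]

-- a trailing 3-entry is ignored by the R pass
theorem pvA_R_append_three (l : List (Int × Int)) : ∀ (r v : Int),
    pvA_R (l ++ [((3:Int), v)]) r = pvA_R l r := by
  induction l with
  | nil =>
    intro r v
    simp [pvA_R]
  | cons pe rest ih =>
    intro r v
    obtain ⟨p, e⟩ := pe
    simp only [List.cons_append, pvA_R]
    split_ifs <;> first | apply ih | rfl

-- overwriting the value at key 3 is ignored by the R pass
theorem pvA_R_overwrite_three (l : List (Int × Int)) : ∀ (r v : Int),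
    pvA_R (l.map (fun p => if p.1 == (3:Int) then ((3:Int), v) else p)) r = pvA_R l r := by
  induction l with
  | nil => intro r v; simp
  | cons pe rest ih =>
    intro r v
    obtain ⟨p, e⟩ := pe
    by_cases h3 : p = 3
    · subst h3
      simp only [List.map_cons, pvA_R]
      simpa using ih r v
    · have hb : ((p, e).1 == (3:Int)) = false := by simp [h3]
      simp only [List.map_cons, hb, Bool.false_eq_true, if_false, pvA_R]
      split_ifs <;> first | apply ih | rfl

-- entries whose key is not 1 mod 3 do not change the product
theorem pv_foldl_skip (l : List (Int × Int)) : ∀ (r : Int),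
    (∀ pe ∈ l, PySem.Int.mod pe.1 3 ≠ 1) → l.foldl pvProdStep r = r := by
  induction l with
  | nil => intro r _; simp
  | cons pe rest ih =>
    intro r h
    have hpe := h pe (by simp)
    simp only [List.foldl_cons, pvProdStep, if_neg hpe]
    exact ih r (fun q hq => h q (by simp [hq]))

-- common tail: from an odd remainder n1 and recorded small factors facs (all ≥ 2, not
-- dividing n1, keys with no residue 1 mod 3), A's dict pipeline equals B's loop value
theorem pv_tail (n1 : Int) (facs : PySem.Dict Int Int)
    (hn1 : 1 ≤ n1) (hodd : ¬ (2:Int) ∣ n1) (hnd : facs.keys.Nodup)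
    (hkeys : ∀ p ∈ facs.keys, 2 ≤ p ∧ ¬ p ∣ n1)
    (hskip : ∀ pe ∈ facs.items, PySem.Int.mod pe.1 3 ≠ 1) :
    (let q := pvA_odd 3 n1 facs
     let fk := if 1 < q.1 then q.2.insert q.1 (q.2.getD q.1 0 + 1) else q.2
     let fn := fk.items.foldl (fun d pe => d.insert pe.1 (2 * pe.2)) PySem.Dict.empty
     let fn2 := fn.insert 3 (fn.getD 3 0 + 1)
     6 * pvA_R fn2.items 1)
    = (let p := pvB_loop 3 n1 1
       6 * (if 1 < p.1 ∧ PySem.Int.mod p.1 3 = 1 then p.2 * 3 else p.2)) := by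
  simp only []
  obtain ⟨q1pos, q1dvd, qnd, qkeys⟩ := pvA_odd_inv 3 n1 facs (by norm_num) hn1 hnd hkeys
  obtain ⟨t1, t2⟩ := pvA_odd_shift (n1 + 2 - 3).toNat 3 n1 facs (le_refl _) (by norm_num) hn1 hkeys
  have hlink := pv_link (n1 + 2 - 3).toNat 3 n1 1 (le_refl _) hn1 hodd (by norm_num) (by decide)
  have hfacs1 : facs.items.foldl pvProdStep (1:Int) = 1 :=
    pv_foldl_skip facs.items 1 hskip
  -- the dict produced by the doubling loop, for an arbitrary key-nodup dict g
  have hdouble : ∀ g : PySem.Dict Int Int, g.keys.Nodup →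
      (g.items.foldl (fun d pe => d.insert pe.1 (2 * pe.2)) PySem.Dict.empty).items
        = g.items.map (fun pe => (pe.1, 2 * pe.2)) := by
    intro g hg
    have := PySem.Dict.items_foldl_insert_fresh g.items Prod.fst (fun pe => 2 * pe.2)
      PySem.Dict.empty (fun a _ => PySem.Dict.contains_empty _)
      (by simpa [PySem.Dict.keys] using hg)
    simpa [show (PySem.Dict.empty : PySem.Dict Int Int).items = [] from rfl] using this
  -- the R pass after the 3-bump is the doubled product
  have hRthree : ∀ g : PySem.Dict Int Int,
      pvA_R ((g.insert 3 (g.getD 3 0 + 1)).items) 1 = pvA_R g.items 1 := by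
    intro g
    by_cases hc3 : g.contains 3
    · rw [PySem.Dict.items_insert_of_contains _ _ hc3]
      exact pvA_R_overwrite_three g.items 1 _
    · rw [PySem.Dict.items_insert_of_not_contains _ _ (Bool.not_eq_true _ ▸ (by simpa using hc3))]
      exact pvA_R_append_three g.items 1 _
  by_cases hbig : 1 < (pvA_odd 3 n1 facs).1
  · have hqc : (pvA_odd 3 n1 facs).2.contains (pvA_odd 3 n1 facs).1 = false := by
      rw [PySem.Dict.contains_eq_decide_mem_keys]
      simp only [decide_eq_false_iff_not]
      intro hmem
      exact (qkeys _ hmem).2 (dvd_refl _)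
    have hgd : (pvA_odd 3 n1 facs).2.getD (pvA_odd 3 n1 facs).1 0 = 0 :=
      PySem.Dict.getD_of_not_contains _ _ hqc
    have hfk : (if 1 < (pvA_odd 3 n1 facs).1 then
          (pvA_odd 3 n1 facs).2.insert (pvA_odd 3 n1 facs).1
            ((pvA_odd 3 n1 facs).2.getD (pvA_odd 3 n1 facs).1 0 + 1)
        else (pvA_odd 3 n1 facs).2).items
        = (pvA_odd 3 n1 facs).2.items ++ [((pvA_odd 3 n1 facs).1, 1)] := by
      rw [if_pos hbig, hgd, zero_add, PySem.Dict.items_insert_of_not_contains _ _ hqc]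
    have hfknd : (if 1 < (pvA_odd 3 n1 facs).1 then
          (pvA_odd 3 n1 facs).2.insert (pvA_odd 3 n1 facs).1
            ((pvA_odd 3 n1 facs).2.getD (pvA_odd 3 n1 facs).1 0 + 1)
        else (pvA_odd 3 n1 facs).2).keys.Nodup := by
      rw [if_pos hbig]
      exact PySem.Dict.nodup_keys_insert _ _ _ qnd
    rw [hRthree, hdouble _ hfknd, pvA_R_doubled, hfk, hlink]
    rw [t2]
    simp only [List.foldl_append, hfacs1, List.foldl_cons, List.foldl_nil]
    rw [← t1]
    by_cases hq3 : PySem.Int.mod (pvA_odd 3 n1 facs).1 3 = 1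
    · rw [if_pos ⟨hbig, hq3⟩]
      have hq3' : (pvA_odd 3 n1 facs).1 % 3 = 1 := by
        rwa [PySem.Int.mod_eq_emod_of_pos (by norm_num)] at hq3
      simp [pvProdStep, hq3']
    · rw [if_neg (fun hc => hq3 hc.2)]
      have hq3' : ¬ (pvA_odd 3 n1 facs).1 % 3 = 1 := by
        rwa [PySem.Int.mod_eq_emod_of_pos (by norm_num)] at hq3
      simp [pvProdStep, hq3']
  · have hfk : (if 1 < (pvA_odd 3 n1 facs).1 then
          (pvA_odd 3 n1 facs).2.insert (pvA_odd 3 n1 facs).1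
            ((pvA_odd 3 n1 facs).2.getD (pvA_odd 3 n1 facs).1 0 + 1)
        else (pvA_odd 3 n1 facs).2) = (pvA_odd 3 n1 facs).2 := if_neg hbig
    rw [hfk, hRthree, hdouble _ qnd, pvA_R_doubled, hlink, t2]
    simp only [List.foldl_append, hfacs1]
    rw [← t1, if_neg]
    intro hcon
    exact hbig hcon.1

-- the two post-guard computations agree for every k ≥ 1
theorem pv_core (k : Int) (hk : 1 ≤ k) :
    (let fk := pvA_factorize k
     let fn := fk.items.foldl (fun d pe => d.insert pe.1 (2 * pe.2)) PySem.Dict.empty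
     let fn2 := fn.insert 3 (fn.getD 3 0 + 1)
     6 * pvA_R fn2.items 1)
    = (let p := pvB_loop 2 k 1
       6 * (if 1 < p.1 ∧ PySem.Int.mod p.1 3 = 1 then p.2 * 3 else p.2)) := by
  simp only []
  by_cases hk4 : 4 ≤ k
  · by_cases hev : PySem.Int.mod k 2 = 0
    · have hc1 : 1 ≤ (pvA_div2 k 0).2 := by
        rw [pvA_div2, dif_pos ⟨by omega, hev⟩]
        have := pvA_div2_c_ge (PySem.Int.floordiv k 2) (0 + 1)
        omega
      obtain ⟨hn1pos, hn1odd⟩ := pvA_div2_facts k 0 (by omega)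
      have hione : (PySem.Dict.empty.insert 2 (pvA_div2 k 0).2).items
          = [((2:Int), (pvA_div2 k 0).2)] := by
        rw [PySem.Dict.items_insert_of_not_contains _ _ (PySem.Dict.contains_empty _)]
        simp [show (PySem.Dict.empty : PySem.Dict Int Int).items = [] from rfl]
      have hfact : pvA_factorize k
          = (let q := pvA_odd 3 (pvA_div2 k 0).1 (PySem.Dict.empty.insert 2 (pvA_div2 k 0).2)
             if 1 < q.1 then q.2.insert q.1 (q.2.getD q.1 0 + 1) else q.2) := by
        rw [pvA_factorize, if_neg (by omega : ¬ k ≤ 1)]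
        simp only [if_pos (by omega : (pvA_div2 k 0).2 ≠ 0)]
      have heB : pvB_loop 2 k 1 = pvB_loop 3 (pvA_div2 k 0).1 1 := by
        rw [pvB_loop, dif_pos (⟨by omega, by norm_num⟩ : (2:Int) * 2 ≤ k ∧ (2:Int) ≤ 2),
          if_pos hev]
        simp only [pvB_div_eq_divloop, pvA_divloop_two]
        rw [if_neg (by decide : ¬ PySem.Int.mod (2:Int) 3 = 1)]
        norm_num
      rw [hfact, heB]
      exact pv_tail (pvA_div2 k 0).1 (PySem.Dict.empty.insert 2 (pvA_div2 k 0).2)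
        hn1pos hn1odd
        (PySem.Dict.nodup_keys_insert _ _ _ (by simp [PySem.Dict.keys_empty]))
        (by
          intro p hp
          rcases (PySem.Dict.mem_keys_insert _ _ _ _).mp hp with hp2 | hpa
          · subst hp2; exact ⟨le_refl _, hn1odd⟩
          · simp [PySem.Dict.keys_empty] at hpa)
        (by
          intro pe hpe
          rw [hione] at hpe
          simp only [List.mem_singleton] at hpe
          subst hpe
          norm_num)
    · have hdiv2 : pvA_div2 k 0 = (k, 0) := by
        rw [pvA_div2, dif_neg (fun hc => hev hc.2)]
      have hkodd : ¬ (2:Int) ∣ k := by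
        rw [← PySem.Int.mod_eq_zero_iff_dvd]; exact hev
      have hfact : pvA_factorize k
          = (let q := pvA_odd 3 k PySem.Dict.empty
             if 1 < q.1 then q.2.insert q.1 (q.2.getD q.1 0 + 1) else q.2) := by
        rw [pvA_factorize, if_neg (by omega : ¬ k ≤ 1), hdiv2]
        norm_num
      have heB : pvB_loop 2 k 1 = pvB_loop 3 k 1 := by
        rw [pvB_loop, dif_pos (⟨by omega, by norm_num⟩ : (2:Int) * 2 ≤ k ∧ (2:Int) ≤ 2),
          if_neg hev]
        norm_num
      rw [hfact, heB]
      exact pv_tail k PySem.Dict.empty (by omega) hkodd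
        (by simp [PySem.Dict.keys_empty])
        (by intro p hp; simp [PySem.Dict.keys_empty] at hp)
        (by intro pe hpe; simp [show (PySem.Dict.empty : PySem.Dict Int Int).items = [] from rfl] at hpe)
  · have hB : pvB_loop 2 k 1 = (k, 1) := by
      rw [pvB_loop, dif_neg (by intro hc; omega)]
    have h123 : k = 1 ∨ k = 2 ∨ k = 3 := by omega
    rcases h123 with hk | hk | hk <;> subst hk
    · have hf : pvA_factorize 1 = PySem.Dict.empty := by
        rw [pvA_factorize]; simp
      rw [hf, hB]
      decide
    · have hd2 : pvA_div2 (2:Int) 0 = (1, 1) := by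
        rw [pvA_div2, dif_pos (by decide)]
        rw [pvA_div2, dif_neg (by decide)]
        decide
      have hf : pvA_factorize 2 = PySem.Dict.empty.insert 2 1 := by
        rw [pvA_factorize, if_neg (by norm_num)]
        simp only [hd2]
        rw [pvA_odd, dif_neg (by decide)]
        norm_num
      rw [hf, hB]
      decide
    · have hd2 : pvA_div2 (3:Int) 0 = (3, 0) := by
        rw [pvA_div2, dif_neg (by decide)]
      have hf : pvA_factorize 3 = PySem.Dict.empty.insert 3 1 := by
        rw [pvA_factorize, if_neg (by norm_num)]
        simp only [hd2]
        rw [pvA_odd, dif_neg (by decide)]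
        norm_num
      rw [hf, hB]
      decide

-- ===== VERDICT (by name: the statement is the Claim_ definition above) =====
theorem B_for_integer_L_py_spec : Claim_equal_B_for_integer_L_py := by
  intro L _
  unfold Spec_B_for_integer_L_py B_for_integer_L_py B_for_integer_L_py_alt
  by_cases hL : L ≤ 0
  · simp [hL]
  · by_cases h3 : PySem.Int.mod L 3 = 0
    · rw [if_neg hL, if_neg (not_not_intro h3),
        if_neg (show ¬ (L ≤ 0 ∨ PySem.Int.mod L 3 ≠ 0) from not_or.mpr ⟨hL, not_not_intro h3⟩)]
      have hk : 1 ≤ PySem.Int.floordiv L 3 := by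
        rw [PySem.Int.mod_eq_emod_of_pos (by norm_num)] at h3
        rw [PySem.Int.floordiv_eq_ediv_of_pos (by norm_num)]
        omega
      exact pv_core (PySem.Int.floordiv L 3) hk
    · have h3' : ¬ (3:Int) ∣ L := by rw [← PySem.Int.mod_eq_zero_iff_dvd]; exact h3
      simp [hL, h3']
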